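-- pv_equiv track=rewrite | github.com/Chuck-Tsui/comps362f | lab00.py | goldbach
-- ===== SOURCE A (Python) =====
-- def primes(n):
--     ls = []
--     for i in range(2, n):
--         if all(i % j != 0 for j in range(2, int(i ** 0.5) + 1)):
--             ls.append(i)
--     return ls
--
-- def goldbach(n):
--     if n <= 5:
--         return None
--     primes_list=primes(n)
--     for a in range (len(primes_list)):
--         for b in range(len(primes_list)):
--             for c in range(len(primes_list)):
--                 if primes_list[a]+primes_list[b]+primes_list[c]==n:
--                     return[primes_list[a],primes_list[b],primes_list[c]]
-- ===== SOURCE B (Python) =====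
-- def goldbach(n):
--     if n <= 5:
--         return None
--     ps = [i for i in range(2, n)
--           if all(i % j != 0 for j in range(2, int(i ** 0.5) + 1))]
--     pset = set(ps)
--     for a in ps:
--         for b in ps:
--             c = n - a - b
--             if c in pset:
--                 return [a, b, c]
--     return None
-- ===== Notes on version B (the rewrite author's own statement) =====
-- stated objective: alternative
-- what changed: B replaces A's triple index loop over the prime list by a double loop over prime values with a precomputed prime set membership test for the third summand (c = n-a-b), removing the inner linear scan.
import Mathlib
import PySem

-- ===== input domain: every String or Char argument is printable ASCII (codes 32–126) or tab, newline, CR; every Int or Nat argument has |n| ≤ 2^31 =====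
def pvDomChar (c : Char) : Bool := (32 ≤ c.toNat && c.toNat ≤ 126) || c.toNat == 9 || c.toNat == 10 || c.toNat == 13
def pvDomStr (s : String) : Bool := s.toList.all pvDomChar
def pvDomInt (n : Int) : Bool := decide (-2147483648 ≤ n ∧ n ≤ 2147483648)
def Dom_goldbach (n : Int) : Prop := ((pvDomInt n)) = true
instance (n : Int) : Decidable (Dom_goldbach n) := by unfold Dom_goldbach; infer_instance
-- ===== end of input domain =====

-- B drops A's inner scan for the third prime: it loops over prime values a, b and tests n-a-b in a precomputed prime set (alternative decomposition; prime generation dominates, no speed claim).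

-- shared primality test of both Pythons: all(i % j != 0 for j in range(2, int(i ** 0.5) + 1)).
-- int(i ** 0.5) is ported as Nat.sqrt i.toNat: exact for 0 ≤ i ≤ 2^31 (the correctly-rounded
-- double sqrt never crosses an integer boundary there); here i ranges over [2, n) with n ≤ 2^31.
def pvTrialPrime (i : Int) : Bool :=
  (PySem.List.pyRange 2 ((Nat.sqrt i.toNat : Int) + 1) 1).all (fun j => PySem.Int.mod i j != 0)

-- ===== PORT A =====
-- primes(n): accumulator list, ls.append(i) under the test
def pvPrimesA (n : Int) : List Int :=
  (PySem.List.pyRange 2 n 1).foldl (fun ls i => if pvTrialPrime i then ls ++ [i] else ls) []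

def goldbach (n : Int) : Option (List Int) :=
  if n ≤ 5 then none
  else
    let ps := pvPrimesA n
    (PySem.List.pyRange 0 (ps.length : Int) 1).findSome? (fun a =>
      (PySem.List.pyRange 0 (ps.length : Int) 1).findSome? (fun b =>
        (PySem.List.pyRange 0 (ps.length : Int) 1).findSome? (fun c =>
          if PySem.List.pyGetD ps a 0 + PySem.List.pyGetD ps b 0 + PySem.List.pyGetD ps c 0 == n
          then some [PySem.List.pyGetD ps a 0, PySem.List.pyGetD ps b 0, PySem.List.pyGetD ps c 0]
          else none)))

-- ===== PORT B =====
-- B's primes: a list comprehension (filter)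
def pvPrimesB (n : Int) : List Int :=
  (PySem.List.pyRange 2 n 1).filter pvTrialPrime

def goldbach_alt (n : Int) : Option (List Int) :=
  if n ≤ 5 then none
  else
    let ps := pvPrimesB n
    let pset : PySem.Set Int := PySem.Set.ofList ps
    ps.findSome? (fun a =>
      ps.findSome? (fun b =>
        let c := n - a - b
        if PySem.Set.contains pset c then some [a, b, c] else none))

-- ===== PRECONDITION & SPEC =====
def Spec_goldbach (n : Int) (out : Option (List Int)) : Prop := out = goldbach_alt n
instance (n : Int) (out : Option (List Int)) : Decidable (Spec_goldbach n out) := by unfold Spec_goldbach; infer_instance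

-- ===== CLAIM (what is proved, stated in full; the proofs are below) =====
def Claim_equal_goldbach : Prop := ∀ (n : Int), Dom_goldbach n → Spec_goldbach n (goldbach n)

-- ===== LEMMAS AND PROOFS =====

-- A's and B's prime lists coincide
theorem pvPrimes_eq (n : Int) : pvPrimesA n = pvPrimesB n := by
  unfold pvPrimesA pvPrimesB
  simpa using PySem.List.foldl_append_if_eq_filter pvTrialPrime (PySem.List.pyRange 2 n 1) []

-- findSome? only depends on the function's values on members
theorem pvFindSome_congr {α β : Type} (l : List α) (f g : α → Option β)
    (h : ∀ x ∈ l, f x = g x) : l.findSome? f = l.findSome? g := by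
  induction l with
  | nil => rfl
  | cons x xs ih =>
      rw [List.findSome?_cons, List.findSome?_cons, h x (by simp),
        ih (fun y hy => h y (by simp [hy]))]

-- iterating indices of range(len(l)) and reading l[i] is iterating the elements
theorem pvFindSome_getD {β : Type} (l : List Int) (f : Int → Option β) :
    (List.range l.length).findSome? (fun k => f (l.getD k 0)) = l.findSome? f := by
  induction l with
  | nil => simp
  | cons x xs ih =>
      rw [List.length_cons, List.range_succ_eq_map, List.findSome?_cons, List.findSome?_map]
      cases hfx : f x with
      | some v => simp [hfx]
      | none =>
          simp only [hfx, List.getD_cons_zero]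
          rw [List.findSome?_cons, hfx, ← ih]
          apply pvFindSome_congr
          intro k _
          rfl

theorem pvFindSome_idx {β : Type} (l : List Int) (f : Int → Option β) :
    (PySem.List.pyRange 0 (l.length : Int) 1).findSome? (fun i => f (PySem.List.pyGetD l i 0))
      = l.findSome? f := by
  rw [PySem.List.pyRange_zero_nat, List.findSome?_map]
  rw [← pvFindSome_getD l f]
  apply pvFindSome_congr
  intro k _
  simp [Function.comp, PySem.List.pyGetD_natCast]

-- scanning a list for the unique value c and returning g c = a membership test
theorem pvFindSome_eq_mem {β : Type} (l : List Int) (c : Int) (g : Int → Option β) :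
    l.findSome? (fun x => if x == c then g x else none)
      = if c ∈ l then g c else none := by
  induction l with
  | nil => simp
  | cons x xs ih =>
      rw [List.findSome?_cons]
      by_cases hx : x = c
      · subst hx
        have hfx : (if (x == x) = true then g x else none) = g x := by simp
        rw [hfx]
        cases hgx : g x with
        | some v => simp
        | none =>
            rw [ih]
            by_cases hxm : x ∈ xs
            · simp [hxm, hgx]
            · simp [hxm]
      · have hbx : (x == c) = false := by simp [hx]
        simp only [hbx, Bool.false_eq_true, if_false]
        rw [ih]
        simp [List.mem_cons, Ne.symm hx]

theorem pvGoldbach_eq (n : Int) : goldbach n = goldbach_alt n := by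
  unfold goldbach goldbach_alt
  by_cases h : n ≤ 5
  · simp [h]
  · simp only [if_neg h, pvPrimes_eq]
    set ps := pvPrimesB n with hps
    rw [pvFindSome_idx ps (fun pa =>
      (PySem.List.pyRange 0 (ps.length : Int) 1).findSome? (fun b =>
        (PySem.List.pyRange 0 (ps.length : Int) 1).findSome? (fun c =>
          if pa + PySem.List.pyGetD ps b 0 + PySem.List.pyGetD ps c 0 == n
          then some [pa, PySem.List.pyGetD ps b 0, PySem.List.pyGetD ps c 0]
          else none)))]
    apply pvFindSome_congr; intro pa _
    rw [pvFindSome_idx ps (fun pb =>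
      (PySem.List.pyRange 0 (ps.length : Int) 1).findSome? (fun c =>
        if pa + pb + PySem.List.pyGetD ps c 0 == n
        then some [pa, pb, PySem.List.pyGetD ps c 0]
        else none))]
    apply pvFindSome_congr; intro pb _
    rw [pvFindSome_idx ps (fun pc =>
      if pa + pb + pc == n then some [pa, pb, pc] else none)]
    have hmem : (PySem.Set.contains (PySem.Set.ofList ps) (n - pa - pb) = true)
        ↔ n - pa - pb ∈ ps := by
      rw [PySem.Set.contains_iff, PySem.Set.mem_ofList]
    have hstep1 : ps.findSome? (fun pc => if pa + pb + pc == n then some [pa, pb, pc] else none)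
        = ps.findSome? (fun pc => if pc == n - pa - pb then some [pa, pb, pc] else none) := by
      apply pvFindSome_congr
      intro pc _
      have : (pa + pb + pc == n) = (pc == n - pa - pb) := by
        by_cases hpc : pc = n - pa - pb
        · have : pa + pb + pc = n := by omega
          simp [hpc]
        · have h2 : ¬ (pa + pb + pc = n) := by omega
          simp [hpc, h2]
      rw [this]
    rw [hstep1, pvFindSome_eq_mem ps (n - pa - pb) (fun pc => some [pa, pb, pc])]
    by_cases hm : n - pa - pb ∈ ps
    · rw [if_pos hm, if_pos (hmem.2 hm)]
    · rw [if_neg hm, if_neg (fun hc => hm (hmem.1 hc))]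

-- ===== VERDICT (by name: the statement is the Claim_ definition above) =====
theorem goldbach_spec : Claim_equal_goldbach := by
  intro n _
  unfold Spec_goldbach
  exact pvGoldbach_eq n
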